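-- pv_equiv track=rewrite | github.com/rickohnemorty/sudokuTool | python code/unused functions/bf.py | combine_to_squares
-- ===== SOURCE A (Python) =====
-- def split_rows(puzzle):
--     splitArr = []
--     for i in puzzle:
--         splitArr.append(i[:3])
--         splitArr.append(i[3:6])
--         splitArr.append(i[6:9])
--     return splitArr
--
-- def combine_to_squares(puzzle):
--     splitArr = split_rows(puzzle)
--     squares = [[],[],[],
--                [],[],[],
--                [],[],[]]
--     counter = 0
--     for i in splitArr:
--         if counter == 0 or counter == 3 or counter == 6:
--             squares[0].append(i)
--         elif counter == 1 or counter == 4 or counter == 7: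
--             squares[1].append(i)
--         elif counter == 2 or counter == 5 or counter == 8:
--             squares[2].append(i)
--         elif counter == 9 or counter == 12 or counter == 15:
--             squares[3].append(i)
--         elif counter == 10 or counter == 13 or counter == 16:
--             squares[4].append(i)
--         elif counter == 11 or counter == 14 or counter == 17:
--             squares[5].append(i)
--         elif counter == 18 or counter == 21 or counter == 24:
--             squares[6].append(i)
--         elif counter == 19 or counter == 22 or counter == 25:
--             squares[7].append(i)
--         elif counter == 20 or counter == 23 or counter == 26:
--             squares[8].append(i)
--         else:
--             pass
--         counter += 1
--     return squares
-- ===== SOURCE B (Python) =====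
-- def combine_to_squares(puzzle):
--     squares = [[] for _ in range(9)]
--     for r, row in enumerate(puzzle[:9]):
--         base = r // 3 * 3
--         squares[base].append(row[:3])
--         squares[base + 1].append(row[3:6])
--         squares[base + 2].append(row[6:9])
--     return squares
-- ===== Notes on version B (the rewrite author's own statement) =====
-- stated objective: simpler
-- what changed: Replaces the split_rows intermediate 3n-chunk list and the 27-branch counter if-chain with a single pass over the first nine rows that computes each chunk's destination block as r//3*3 + c by index arithmetic.
import Mathlib
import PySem

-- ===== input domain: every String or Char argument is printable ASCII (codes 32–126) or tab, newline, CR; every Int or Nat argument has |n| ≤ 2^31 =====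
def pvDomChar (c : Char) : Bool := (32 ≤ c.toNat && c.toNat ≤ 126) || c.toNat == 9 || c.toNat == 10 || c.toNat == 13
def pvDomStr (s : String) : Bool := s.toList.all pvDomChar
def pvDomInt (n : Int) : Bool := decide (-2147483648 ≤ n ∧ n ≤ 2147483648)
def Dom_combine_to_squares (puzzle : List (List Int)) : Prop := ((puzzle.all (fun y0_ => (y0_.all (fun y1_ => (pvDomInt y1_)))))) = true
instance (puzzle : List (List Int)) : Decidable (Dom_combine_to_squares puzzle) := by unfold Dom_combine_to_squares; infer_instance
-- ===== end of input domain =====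

-- B replaces the 27-element intermediate list and the 27-branch counter dispatch by one
-- pass over the first nine rows, computing each chunk's destination block by index
-- arithmetic (objective: simpler).

-- ===== PORT A =====
-- squares[k].append(i) on a list of lists (k a Python int, here always 0 ≤ k < 9, so
-- .toNat/getD are exact)
def pvApp (squares : List (List (List Int))) (k : Int) (i : List Int) :
    List (List (List Int)) :=
  squares.set k.toNat (squares.getD k.toNat [] ++ [i])

def split_rows (puzzle : List (List Int)) : List (List Int) :=
  puzzle.foldl (fun splitArr i =>
    ((splitArr ++ [PySem.List.slice i none (some 3)]) ++
      [PySem.List.slice i (some 3) (some 6)]) ++ [PySem.List.slice i (some 6) (some 9)]) []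

def stepA (st : List (List (List Int)) × Int) (i : List Int) :
    List (List (List Int)) × Int :=
  let squares := st.1
  let counter := st.2
  let squares' :=
    if counter = 0 ∨ counter = 3 ∨ counter = 6 then pvApp squares 0 i
    else if counter = 1 ∨ counter = 4 ∨ counter = 7 then pvApp squares 1 i
    else if counter = 2 ∨ counter = 5 ∨ counter = 8 then pvApp squares 2 i
    else if counter = 9 ∨ counter = 12 ∨ counter = 15 then pvApp squares 3 i
    else if counter = 10 ∨ counter = 13 ∨ counter = 16 then pvApp squares 4 i
    else if counter = 11 ∨ counter = 14 ∨ counter = 17 then pvApp squares 5 i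
    else if counter = 18 ∨ counter = 21 ∨ counter = 24 then pvApp squares 6 i
    else if counter = 19 ∨ counter = 22 ∨ counter = 25 then pvApp squares 7 i
    else if counter = 20 ∨ counter = 23 ∨ counter = 26 then pvApp squares 8 i
    else squares
  (squares', counter + 1)

def combine_to_squares (puzzle : List (List Int)) : List (List (List Int)) :=
  ((split_rows puzzle).foldl stepA
    ([[], [], [], [], [], [], [], [], []], 0)).1

-- ===== PORT B =====
def stepB (squares : List (List (List Int))) (p : Int × List Int) :
    List (List (List Int)) :=
  let base := PySem.Int.floordiv p.1 3 * 3
  let squares := pvApp squares base (PySem.List.slice p.2 none (some 3))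
  let squares := pvApp squares (base + 1) (PySem.List.slice p.2 (some 3) (some 6))
  pvApp squares (base + 2) (PySem.List.slice p.2 (some 6) (some 9))

def combine_to_squares_alt (puzzle : List (List Int)) : List (List (List Int)) :=
  (PySem.List.enumerate (PySem.List.slice puzzle none (some 9))).foldl stepB
    (List.replicate 9 [])

-- ===== PRECONDITION & SPEC =====
def Spec_combine_to_squares (puzzle : List (List Int)) (out : List (List (List Int))) : Prop := out = combine_to_squares_alt puzzle
instance (puzzle : List (List Int)) (out : List (List (List Int))) : Decidable (Spec_combine_to_squares puzzle out) := by unfold Spec_combine_to_squares; infer_instance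

-- ===== CLAIM (what is proved, stated in full; the proofs are below) =====
def Claim_equal_combine_to_squares : Prop := ∀ (puzzle : List (List Int)), Dom_combine_to_squares puzzle → Spec_combine_to_squares puzzle (combine_to_squares puzzle)

-- ===== LEMMAS AND PROOFS =====

def chunk3 (i : List Int) : List (List Int) :=
  [PySem.List.slice i none (some 3), PySem.List.slice i (some 3) (some 6),
    PySem.List.slice i (some 6) (some 9)]

theorem split_rows_eq_flatMap (l : List (List Int)) :
    split_rows l = l.flatMap chunk3 := by
  have aux : ∀ (l : List (List Int)) (acc : List (List Int)),
      l.foldl (fun splitArr i =>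
        ((splitArr ++ [PySem.List.slice i none (some 3)]) ++
          [PySem.List.slice i (some 3) (some 6)]) ++ [PySem.List.slice i (some 6) (some 9)]) acc
      = acc ++ l.flatMap chunk3 := by
    intro l
    induction l with
    | nil => intro acc; simp
    | cons a t ih =>
        intro acc
        rw [List.foldl_cons, ih]
        simp [chunk3]
  exact aux l []

theorem split_rows_append (xs ys : List (List Int)) :
    split_rows (xs ++ ys) = split_rows xs ++ split_rows ys := by
  simp [split_rows_eq_flatMap]

theorem stepA_snd (st : List (List (List Int)) × Int) (i : List Int) :
    (stepA st i).2 = st.2 + 1 := by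
  simp [stepA]

theorem foldl_stepA_snd (l : List (List Int)) (st : List (List (List Int)) × Int) :
    (l.foldl stepA st).2 = st.2 + l.length := by
  induction l generalizing st with
  | nil => simp
  | cons a t ih =>
      rw [List.foldl_cons, ih, stepA_snd]
      simp only [List.length_cons]
      push_cast; ring

theorem length_split_rows (l : List (List Int)) :
    (split_rows l).length = 3 * l.length := by
  induction l with
  | nil => rfl
  | cons a t ih =>
      rw [split_rows_eq_flatMap] at ih ⊢
      simp [chunk3, ih]
      omega

theorem stepA_ge (st : List (List (List Int)) × Int) (i : List Int) (h : 27 ≤ st.2) :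
    stepA st i = (st.1, st.2 + 1) := by
  simp only [stepA]
  split_ifs <;> first | rfl | omega

theorem foldl_stepA_ge (l : List (List Int)) (st : List (List (List Int)) × Int)
    (h : 27 ≤ st.2) : (l.foldl stepA st).1 = st.1 := by
  induction l generalizing st with
  | nil => rfl
  | cons a t ih =>
      rw [List.foldl_cons, stepA_ge st a h]
      exact ih _ (by dsimp; omega)

theorem combine_take (puzzle : List (List Int)) :
    combine_to_squares puzzle = combine_to_squares (puzzle.take 9) := by
  by_cases h : puzzle.length ≤ 9
  · rw [List.take_of_length_le h]
  · conv_lhs => rw [← List.take_append_drop 9 puzzle]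
    unfold combine_to_squares
    rw [split_rows_append, List.foldl_append]
    rw [foldl_stepA_ge]
    rw [foldl_stepA_snd, length_split_rows]
    have : (puzzle.take 9).length = 9 := by simp; omega
    rw [this]; norm_num

theorem alt_take (puzzle : List (List Int)) :
    combine_to_squares_alt puzzle = combine_to_squares_alt (puzzle.take 9) := by
  unfold combine_to_squares_alt
  rw [PySem.List.slice_to puzzle (by norm_num),
    PySem.List.slice_to (puzzle.take 9) (by norm_num)]
  norm_num [List.take_take]

set_option maxHeartbeats 1000000 in
theorem rowA (S : List (List (List Int))) (r : Nat) (hr : r < 9) (row : List Int) :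
    (chunk3 row).foldl stepA (S, 3 * (r : Int)) = (stepB S ((r : Int), row), 3 * (r : Int) + 3) := by
  interval_cases r <;>
    simp [chunk3, stepA, stepB, PySem.Int.floordiv]

theorem main_inv (l : List (List Int)) :
    ∀ (S : List (List (List Int))) (r : Nat), r + l.length ≤ 9 →
    ((l.flatMap chunk3).foldl stepA (S, 3 * (r : Int))).1 =
      (PySem.List.enumerate l (r : Int)).foldl stepB S := by
  induction l with
  | nil => intro S r _; rfl
  | cons a t ih =>
      intro S r h
      simp only [List.length_cons] at h
      rw [List.flatMap_cons, List.foldl_append, rowA S r (by omega) a,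
        PySem.List.enumerate_cons a t (r : Int)]
      have h3 : (3 : Int) * (r : Int) + 3 = 3 * ((r + 1 : Nat) : Int) := by push_cast; ring
      rw [List.foldl_cons, h3, ih _ (r + 1) (by omega)]
      norm_cast

theorem combine_eq_alt_short (q : List (List Int)) (h : q.length ≤ 9) :
    combine_to_squares q = combine_to_squares_alt q := by
  unfold combine_to_squares combine_to_squares_alt
  rw [split_rows_eq_flatMap, PySem.List.slice_to q (by norm_num)]
  have h9 : q.take (9 : Int).toNat = q := by
    rw [show ((9:Int).toNat) = 9 from rfl]
    exact List.take_of_length_le h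
  rw [h9]
  have : ((0 : Int)) = 3 * ((0 : Nat) : Int) := by norm_num
  rw [show ([[], [], [], [], [], [], [], [], []] : List (List (List Int)))
        = List.replicate 9 [] from rfl, this]
  exact main_inv q (List.replicate 9 []) 0 (by omega)

-- ===== VERDICT (by name: the statement is the Claim_ definition above) =====
theorem combine_to_squares_spec : Claim_equal_combine_to_squares := by
  intro puzzle _
  unfold Spec_combine_to_squares
  rw [combine_take, alt_take]
  exact combine_eq_alt_short _ (by simp)
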